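-- pv_equiv track=rewrite | github.com/pypi-data/pypi-mirror-75 | packages/Frontiersman/Frontiersman-1.0.17.tar.gz/Frontiersman-1.0.17/frontiersman/client/Gui.py | card_list_to_arr
-- ===== SOURCE A (Python) =====
-- def card_list_to_arr(res_list):
--     array1 = [0, 0, 0, 0, 0]
--     for r in res_list:
--         if r == 'Brick':
--             array1[0] += 1
--         elif r == 'Wheat':
--             array1[1] += 1
--         elif r == 'Wood':
--             array1[2] += 1
--         elif r == 'Ore':
--             array1[3] += 1
--         elif r == 'Sheep':
--             array1[4] += 1
--     return array1
-- ===== SOURCE B (Python) =====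
-- def card_list_to_arr(res_list):
--     return [res_list.count(n) for n in ['Brick', 'Wheat', 'Wood', 'Ore', 'Sheep']]
-- ===== Notes on version B (the rewrite author's own statement) =====
-- stated objective: idiomatic
-- what changed: Replaces the single mutable-accumulator if/elif tally loop with one independent list.count scan per resource type over a fixed ordered name list.
import Mathlib
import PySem

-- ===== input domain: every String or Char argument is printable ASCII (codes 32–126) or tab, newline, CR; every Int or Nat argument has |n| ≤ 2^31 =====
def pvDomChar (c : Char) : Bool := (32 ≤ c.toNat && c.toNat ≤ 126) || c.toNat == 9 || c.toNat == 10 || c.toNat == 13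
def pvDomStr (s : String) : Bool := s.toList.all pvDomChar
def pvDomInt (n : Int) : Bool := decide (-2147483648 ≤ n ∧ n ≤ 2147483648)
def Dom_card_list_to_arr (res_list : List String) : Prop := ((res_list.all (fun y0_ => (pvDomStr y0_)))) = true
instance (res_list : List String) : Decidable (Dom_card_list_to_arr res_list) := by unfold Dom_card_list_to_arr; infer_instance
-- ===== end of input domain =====

-- B replaces A's one-pass if/elif accumulator loop with one independent count per resource
-- type over the fixed ordered name list (idiomatic; same result, same asymptotic cost).

-- ===== PORT A =====
def card_list_to_arr (res_list : List String) : List Int :=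
  res_list.foldl (fun arr r =>
    if r == "Brick" then arr.set 0 (arr.getD 0 0 + 1)
    else if r == "Wheat" then arr.set 1 (arr.getD 1 0 + 1)
    else if r == "Wood" then arr.set 2 (arr.getD 2 0 + 1)
    else if r == "Ore" then arr.set 3 (arr.getD 3 0 + 1)
    else if r == "Sheep" then arr.set 4 (arr.getD 4 0 + 1)
    else arr) [0, 0, 0, 0, 0]

-- ===== PORT B =====
def card_list_to_arr_alt (res_list : List String) : List Int :=
  ["Brick", "Wheat", "Wood", "Ore", "Sheep"].map
    (fun n => (PySem.List.count res_list n : Int))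

-- ===== PRECONDITION & SPEC =====
def Spec_card_list_to_arr (res_list : List String) (out : List Int) : Prop := out = card_list_to_arr_alt res_list
instance (res_list : List String) (out : List Int) : Decidable (Spec_card_list_to_arr res_list out) := by unfold Spec_card_list_to_arr; infer_instance

-- ===== CLAIM (what is proved, stated in full; the proofs are below) =====
def Claim_equal_card_list_to_arr : Prop := ∀ (res_list : List String), Dom_card_list_to_arr res_list → Spec_card_list_to_arr res_list (card_list_to_arr res_list)

-- ===== LEMMAS AND PROOFS =====

-- Invariant of A's loop: folding over xs from any 5-slot state adds the five counts slotwise.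
theorem card_fold_eq (xs : List String) (a b c d e : Int) :
    xs.foldl (fun arr r =>
      if r == "Brick" then arr.set 0 (arr.getD 0 0 + 1)
      else if r == "Wheat" then arr.set 1 (arr.getD 1 0 + 1)
      else if r == "Wood" then arr.set 2 (arr.getD 2 0 + 1)
      else if r == "Ore" then arr.set 3 (arr.getD 3 0 + 1)
      else if r == "Sheep" then arr.set 4 (arr.getD 4 0 + 1)
      else arr) [a, b, c, d, e]
    = [a + xs.count "Brick", b + xs.count "Wheat", c + xs.count "Wood",
       d + xs.count "Ore", e + xs.count "Sheep"] := by
  induction xs generalizing a b c d e with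
  | nil => simp
  | cons x xs ih =>
    simp only [List.foldl_cons, List.count_cons]
    by_cases h1 : x = "Brick"
    · subst h1; have h := ih (a + 1) b c d e; simp at h ⊢; rw [h]; simp; omega
    · by_cases h2 : x = "Wheat"
      · subst h2; have h := ih a (b + 1) c d e; simp [h1] at h ⊢; rw [h]; simp; omega
      · by_cases h3 : x = "Wood"
        · subst h3; have h := ih a b (c + 1) d e; simp [h1, h2] at h ⊢; rw [h]; simp; omega
        · by_cases h4 : x = "Ore"
          · subst h4; have h := ih a b c (d + 1) e; simp [h1, h2, h3] at h ⊢; rw [h]; simp; omega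
          · by_cases h5 : x = "Sheep"
            · subst h5; have h := ih a b c d (e + 1); simp [h1, h2, h3, h4] at h ⊢; rw [h]; simp; omega
            · have h := ih a b c d e; simp at h ⊢; simp [h1, h2, h3, h4, h5]; exact h

-- ===== VERDICT (by name: the statement is the Claim_ definition above) =====
theorem card_list_to_arr_spec : Claim_equal_card_list_to_arr := by
  intro res_list _
  show card_list_to_arr res_list = card_list_to_arr_alt res_list
  unfold card_list_to_arr card_list_to_arr_alt
  rw [card_fold_eq]
  simp [PySem.List.count_eq]
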